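-- pv_equiv track=rewrite | github.com/venkatp1997/SMAI-Project | extractor.py | filter_authors
-- ===== SOURCE A (Python) =====
-- from collections import Counter
--
-- def second_names(x):
--     if x: return x.split()[-1]
--     else: return ''
--
-- def filter_authors(probable_authors):
--     """ Returns filtered list of authors """
--     #second_names = lambda x: x.split()[-1]
--     names, ids = zip(*probable_authors)
--     cleaned = []
--     counter = Counter(list(map(second_names, names)))
--     for (name, aid) in probable_authors:
--         if counter[second_names(name)] == 1:
--             cleaned.append((name, aid))
--     return cleaned
-- ===== SOURCE B (Python) =====
-- def second_names(x):
--     if x: return x.split()[-1]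
--     else: return ''
--
-- def filter_authors(probable_authors):
--     """ Returns filtered list of authors """
--     groups = {}
--     for name, aid in probable_authors:
--         groups.setdefault(second_names(name), []).append((name, aid))
--     return [pair for bucket in groups.values() if len(bucket) == 1 for pair in bucket]
-- ===== Notes on version B (the rewrite author's own statement) =====
-- stated objective: simpler
-- what changed: Replaces the Counter-then-refilter double pass with a single grouping pass into a dict of buckets, emitting the singleton buckets directly in key-first-occurrence order (which coincides with input order).
-- outside the precondition, e.g. on filter_authors([]): A raises ValueError, B returns []; on filter_authors([(' ', '1')]): A raises IndexError, B raises IndexError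
import Mathlib
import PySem

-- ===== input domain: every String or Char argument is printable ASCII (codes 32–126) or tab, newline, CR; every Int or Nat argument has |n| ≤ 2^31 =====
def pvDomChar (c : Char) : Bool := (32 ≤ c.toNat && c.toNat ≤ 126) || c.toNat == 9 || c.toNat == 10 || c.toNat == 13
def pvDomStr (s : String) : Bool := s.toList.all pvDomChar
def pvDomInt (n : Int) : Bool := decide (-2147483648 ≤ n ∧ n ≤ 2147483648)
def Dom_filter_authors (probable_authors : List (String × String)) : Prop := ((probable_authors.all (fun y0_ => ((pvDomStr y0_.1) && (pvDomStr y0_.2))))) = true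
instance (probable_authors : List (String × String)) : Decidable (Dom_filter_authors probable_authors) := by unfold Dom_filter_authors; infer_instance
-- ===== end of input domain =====

-- B replaces A's Counter-then-refilter double pass with one grouping pass into buckets,
-- emitting the singleton buckets directly (objective: simpler; same asymptotic cost).

-- ===== PORT A =====
-- second_names(x): x.split()[-1] if x else ''  (the [-1] IndexError case is excluded by Pre_)
def secondNames (x : String) : String :=
  if x ≠ "" then PySem.List.pyGetD (PySem.Str.split₀ x) (-1) "" else ""

def filter_authors (probable_authors : List (String × String)) : List (String × String) :=
  -- names, ids = zip(*probable_authors): raises ValueError on [] (excluded by Pre_)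
  let names := probable_authors.map Prod.fst
  let counter := PySem.Dict.counter (names.map secondNames)
  probable_authors.foldl
    (fun cleaned p =>
      if counter.getD (secondNames p.1) 0 == 1 then cleaned ++ [p] else cleaned) []

-- ===== PORT B =====
def filter_authors_alt (probable_authors : List (String × String)) : List (String × String) :=
  let groups := probable_authors.foldl
    (fun d p => d.modify (secondNames p.1) [] (· ++ [p])) PySem.Dict.empty
  groups.values.flatMap (fun bucket => if bucket.length == 1 then bucket else [])

-- ===== PRECONDITION & SPEC =====
-- Pre_ excludes exactly the inputs where Python A raises: the empty list (ValueError from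
-- unpacking zip(*[])) and any pair whose name is non-empty but whitespace-only
-- (IndexError from x.split()[-1], which B's second_names raises too).
def Pre_filter_authors (probable_authors : List (String × String)) : Prop :=
  probable_authors ≠ [] ∧
  ∀ p ∈ probable_authors, p.1 = "" ∨ PySem.Str.split₀ p.1 ≠ []
instance (probable_authors : List (String × String)) : Decidable (Pre_filter_authors probable_authors) := by
  unfold Pre_filter_authors; infer_instance

def pvWitness_filter_authors : (List (String × String)) := [("Ada Lovelace", "1")]

def Spec_filter_authors (probable_authors : List (String × String)) (out : List (String × String)) : Prop := out = filter_authors_alt probable_authors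
instance (probable_authors : List (String × String)) (out : List (String × String)) : Decidable (Spec_filter_authors probable_authors out) := by unfold Spec_filter_authors; infer_instance

-- ===== CLAIM (what is proved, stated in full; the proofs are below) =====
def Claim_equal_filter_authors : Prop := ∀ (probable_authors : List (String × String)), Dom_filter_authors probable_authors → Pre_filter_authors probable_authors → Spec_filter_authors probable_authors (filter_authors probable_authors)


-- ===== LEMMAS AND PROOFS =====

-- set(xs) commutes with filtering by a predicate on the values.
lemma ofList_filter {α : Type} [BEq α] [LawfulBEq α] (q : α → Bool) (l : List α) :
    PySem.Set.ofList (l.filter q) = (PySem.Set.ofList l).filter q := by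
  induction l with
  | nil => simp
  | cons x xs ih =>
    by_cases hx : q x = true
    · rw [List.filter_cons_of_pos hx, PySem.Set.ofList_cons, PySem.Set.ofList_cons,
        List.filter_cons_of_pos hx]
      congr 1
      simp only [PySem.Set.discard, ih, List.filter_filter]
      apply List.filter_congr
      intro a _
      exact Bool.and_comm _ _
    · have hx' : q x = false := by simpa using hx
      rw [List.filter_cons_of_neg hx, PySem.Set.ofList_cons, ih,
        List.filter_cons_of_neg hx]
      simp only [PySem.Set.discard, List.filter_filter]
      symm
      apply List.filter_congr
      intro a _
      by_cases ha : (a == x) = true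
      · have : a = x := eq_of_beq ha
        subst this
        simp [hx']
      · have ha' : (a == x) = false := by simpa using ha
        simp [ha']

-- the tail of A's filter over p :: rest equals the same filter computed on rest
-- with all key-p elements removed.
lemma tail_filter_eq {α κ : Type} [BEq κ] [LawfulBEq κ] (key : α → κ) (p : α) (rest : List α) :
    rest.filter (fun x => decide ((p :: rest).countP (fun q => key q == key x) = 1))
      = (rest.filter (fun q => !(key q == key p))).filter
          (fun x => decide ((rest.filter (fun q => !(key q == key p))).countP
              (fun q => key q == key x) = 1)) := by
  have ha : rest.filter (fun x => decide ((p :: rest).countP (fun q => key q == key x) = 1))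
      = rest.filter (fun x =>
          decide ((p :: rest).countP (fun q => key q == key x) = 1) && !(key x == key p)) := by
    apply List.filter_congr
    intro x hx
    by_cases hxp : (key x == key p) = true
    · have hxp' : key x = key p := eq_of_beq hxp
      have h1c : 0 < rest.countP (fun q => key q == key x) := by
        rw [List.countP_eq_length_filter]
        exact List.length_pos_of_mem (List.mem_filter.mpr ⟨hx, by simp⟩)
      have hstep : (p :: rest).countP (fun q => key q == key x)
          = rest.countP (fun q => key q == key x) + 1 := by
        rw [List.countP_cons]
        simp [hxp']
      have hfalse : decide ((p :: rest).countP (fun q => key q == key x) = 1) = false := by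
        rw [hstep, decide_eq_false_iff_not]
        omega
      simp [hfalse]
    · have hxp' : (key x == key p) = false := by simpa using hxp
      simp [hxp']
  rw [ha, ← List.filter_filter]
  apply List.filter_congr
  intro x hx
  rcases List.mem_filter.mp hx with ⟨hxr, hxp⟩
  have hxp' : (key x == key p) = false := by simpa using hxp
  have hpx : (key p == key x) = false := by
    rw [beq_eq_false_iff_ne] at hxp' ⊢
    exact fun h => hxp' h.symm
  have h1 : (p :: rest).countP (fun q => key q == key x)
      = rest.countP (fun q => key q == key x) := by
    rw [List.countP_cons]
    simp [hpx]
  have h2 : (rest.filter (fun q => !(key q == key p))).countP (fun q => key q == key x)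
      = rest.countP (fun q => key q == key x) := by
    rw [List.countP_filter]
    apply List.countP_congr
    intro a _
    by_cases hax : (key a == key x) = true
    · have hax' : key a = key x := eq_of_beq hax
      have : (key a == key p) = false := by
        rw [hax']
        exact hxp'
      simp [hax, this]
    · have hax' : (key a == key x) = false := by simpa using hax
      simp [hax']
  rw [h1, h2]

-- Flattening the singleton buckets in key-first-occurrence order IS filtering by key-count 1.
lemma flat_buckets_eq_filter {α κ : Type} [BEq κ] [LawfulBEq κ] (key : α → κ) :
    ∀ (n : Nat) (pa : List α), pa.length ≤ n →
      (PySem.Set.ofList (pa.map key)).flatMap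
          (fun k =>
            if (pa.filter (fun p => key p == k)).length == 1
            then pa.filter (fun p => key p == k) else [])
        = pa.filter (fun p => pa.countP (fun q => key q == key p) = 1) := by
  intro n
  induction n with
  | zero =>
    intro pa h
    have : pa = [] := List.length_eq_zero_iff.mp (Nat.le_zero.mp h)
    subst this
    simp
  | succ n ih =>
    intro pa hlen
    match pa with
    | [] => simp
    | p :: rest =>
      have hlen' : rest.length ≤ n := by simpa using hlen
      have hr'len : (rest.filter (fun q => !(key q == key p))).length ≤ n :=
        le_trans (List.length_filter_le _ _) hlen'
      have hofl : PySem.Set.ofList ((p :: rest).map key)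
          = key p :: PySem.Set.ofList ((rest.filter (fun q => !(key q == key p))).map key) := by
        rw [List.map_cons, PySem.Set.ofList_cons]
        congr 1
        simp only [PySem.Set.discard]
        rw [← ofList_filter, List.filter_map]
        rfl
      rw [hofl, List.flatMap_cons]
      have hheadb : (p :: rest).filter (fun q => key q == key p)
          = p :: rest.filter (fun q => key q == key p) := by simp
      have htail : (PySem.Set.ofList ((rest.filter (fun q => !(key q == key p))).map key)).flatMap
            (fun k =>
              if ((p :: rest).filter (fun q => key q == k)).length == 1
              then (p :: rest).filter (fun q => key q == k) else [])
          = (PySem.Set.ofList ((rest.filter (fun q => !(key q == key p))).map key)).flatMap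
            (fun k =>
              if ((rest.filter (fun q => !(key q == key p))).filter (fun q => key q == k)).length == 1
              then (rest.filter (fun q => !(key q == key p))).filter (fun q => key q == k) else []) := by
        rw [List.flatMap_def, List.flatMap_def]
        congr 1
        apply List.map_congr_left
        intro k hk
        have hkne : (key p == k) = false := by
          have hk' : k ∈ (rest.filter (fun q => !(key q == key p))).map key :=
            (PySem.Set.mem_ofList _ _).mp hk
          rcases List.mem_map.mp hk' with ⟨q, hq, rfl⟩
          rcases List.mem_filter.mp hq with ⟨_, hqp⟩
          have hqp' : (key q == key p) = false := by simpa using hqp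
          rw [beq_eq_false_iff_ne] at hqp' ⊢
          exact fun h => hqp' h.symm
        have hb : (p :: rest).filter (fun q => key q == k)
            = (rest.filter (fun q => !(key q == key p))).filter (fun q => key q == k) := by
          rw [List.filter_cons_of_neg (by simpa using hkne), List.filter_filter]
          apply List.filter_congr
          intro a _
          by_cases ha : (key a == k) = true
          · have ha' : key a = k := eq_of_beq ha
            have hap : (key a == key p) = false := by
              rw [ha', beq_eq_false_iff_ne]
              rw [beq_eq_false_iff_ne] at hkne
              exact fun h => hkne h.symm
            simp [ha, hap]
          · have ha' : (key a == k) = false := by simpa using ha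
            simp [ha']
        rw [hb]
      rw [htail, ih _ hr'len]
      rw [hheadb]
      conv_rhs => rw [List.filter_cons]
      have hflen : (rest.filter (fun q => key q == key p)).length
          = rest.countP (fun q => key q == key p) :=
        (List.countP_eq_length_filter).symm
      have hcntP : ((p :: rest).countP (fun q => key q == key p)) =
          rest.countP (fun q => key q == key p) + 1 := by
        rw [List.countP_cons]
        simp
      by_cases hz : rest.countP (fun q => key q == key p) = 0
      · have hfe : rest.filter (fun q => key q == key p) = [] :=
          List.length_eq_zero_iff.mp (by omega)
        rw [hfe]
        have hpp : (decide ((p :: rest).countP (fun q => key q == key p) = 1)) = true := by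
          rw [hcntP, hz]
          simp
        rw [if_pos (show (([p].length == 1) = true) by rfl), if_pos hpp,
          List.cons_append, List.nil_append]
        congr 1
        exact (tail_filter_eq key p rest).symm
      · have hlen1 : ((p :: rest.filter (fun q => key q == key p)).length == 1) = false := by
          simp only [List.length_cons]
          rw [beq_eq_false_iff_ne]
          omega
        have hnot1 : ¬ (((p :: rest.filter (fun q => key q == key p)).length == 1) = true) := by
          rw [hlen1]
          simp
        rw [if_neg hnot1]
        have hpp : (decide ((p :: rest).countP (fun q => key q == key p) = 1)) = false := by
          rw [hcntP, decide_eq_false_iff_not]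
          omega
        have hnot2 : ¬ ((decide ((p :: rest).countP (fun q => key q == key p) = 1)) = true) := by
          rw [hpp]
          simp
        rw [if_neg hnot2, List.nil_append]
        exact (tail_filter_eq key p rest).symm

-- A computes: keep the pairs whose key occurs exactly once.
lemma filter_authors_char (pa : List (String × String)) :
    filter_authors pa
      = pa.filter (fun p => pa.countP (fun q => secondNames q.1 == secondNames p.1) = 1) := by
  unfold filter_authors
  rw [PySem.List.foldl_append_if
      (p := fun p : String × String =>
        (PySem.Dict.counter ((pa.map Prod.fst).map secondNames)).getD (secondNames p.1) 0 == 1)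
      (f := fun p => p)]
  simp only [List.nil_append, List.map_id_fun', id]
  apply List.filter_congr
  intro x _
  rw [PySem.Dict.getD_counter]
  rw [Bool.eq_iff_iff]
  simp [List.count, List.map_map, List.countP_map]
  exact Iff.rfl

-- B computes: flatten the singleton buckets, keys in first-occurrence order.
lemma filter_authors_alt_char (pa : List (String × String)) :
    filter_authors_alt pa
      = (PySem.Set.ofList (pa.map (fun p => secondNames p.1))).flatMap
          (fun k =>
            if (pa.filter (fun p => secondNames p.1 == k)).length == 1
            then pa.filter (fun p => secondNames p.1 == k) else []) := by
  unfold filter_authors_alt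
  have hfold : pa.foldl (fun d p => d.modify (secondNames p.1) [] (· ++ [p])) PySem.Dict.empty
      = (pa.map (fun p => ((secondNames p.1 : String), p))).foldl
          (fun d q => d.modify q.1 [] (· ++ [q.2])) PySem.Dict.empty := by
    rw [List.foldl_map]
  have hnodup : (pa.foldl (fun d p => d.modify (secondNames p.1) [] (· ++ [p]))
      PySem.Dict.empty).keys.Nodup := by
    apply PySem.Dict.nodup_keys_foldl_modify_key
    simp [PySem.Dict.keys_empty]
  have hkeys : (pa.foldl (fun d p => d.modify (secondNames p.1) [] (· ++ [p]))
      PySem.Dict.empty).keys = PySem.Set.ofList (pa.map (fun p => secondNames p.1)) := by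
    rw [PySem.Dict.keys_foldl_modify_key pa (fun p => secondNames p.1) []
      (fun _ p => (· ++ [p])) PySem.Dict.empty, PySem.Dict.keys_empty]
    rfl
  have hgetD : ∀ k, (pa.foldl (fun d p => d.modify (secondNames p.1) [] (· ++ [p]))
      PySem.Dict.empty).getD k [] = pa.filter (fun p => secondNames p.1 == k) := by
    intro k
    rw [hfold, PySem.Dict.getD_foldl_modify_append, PySem.Dict.getD_empty,
      List.filter_map, List.map_map, List.nil_append]
    show List.map (fun p : String × String => p)
        (List.filter (fun p : String × String => secondNames p.1 == k) pa) = _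
    simp
  show (pa.foldl (fun d p => d.modify (secondNames p.1) [] (· ++ [p]))
      PySem.Dict.empty).values.flatMap
      (fun bucket => if bucket.length == 1 then bucket else []) = _
  rw [PySem.Dict.values_eq_map_keys _ hnodup [], hkeys,
    List.flatMap_def, List.flatMap_def, List.map_map]
  congr 1
  apply List.map_congr_left
  intro k _
  simp only [Function.comp_apply, hgetD k]

-- ===== VERDICT (by name: the statement is the Claim_ definition above) =====
theorem filter_authors_spec : Claim_equal_filter_authors := by
  intro pa _ _
  unfold Spec_filter_authors
  rw [filter_authors_char, filter_authors_alt_char,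
    flat_buckets_eq_filter (fun p : String × String => secondNames p.1) pa.length pa le_rfl]
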